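-- pv_equiv track=rewrite | github.com/brendanxwhitaker/telephone | telephone/utils.py | get_substring_starting_index_map
-- ===== SOURCE A (Python) =====
-- from typing import List, Set, Dict, Tuple
--
-- def get_substring_starting_index_map(number: str) -> Dict[int, List[str]]:
--     """ Map starting indices to substrings of ``number``. """
--     if number == "":
--         return {}
--     substrs_map: Dict[int, List[str]] = {}
--     for i in range(len(number)):
--         substrs_starting_at_i: List[str] = []
--         for j in range(i, len(number)):
--             substr = number[i : j + 1]
--             substrs_starting_at_i.append(substr)
--         substrs_map[i] = substrs_starting_at_i
--     return substrs_map
-- ===== SOURCE B (Python) =====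
-- def get_substring_starting_index_map(number: str):
--     """ Map starting indices to substrings of ``number`` via a suffix recurrence. """
--     prev = []
--     rows = []
--     for ch in reversed(number):
--         prev = [ch] + [ch + s for s in prev]
--         rows.append(prev)
--     rows.reverse()
--     return dict(enumerate(rows))
-- ===== Notes on version B (the rewrite author's own statement) =====
-- stated objective: alternative
-- what changed: B builds each index's substring list from the next index's list by a suffix recurrence (prepend the current character), iterating once from the end, instead of re-slicing number[i:j+1] in a nested loop for every (i, j).
import Mathlib
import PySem

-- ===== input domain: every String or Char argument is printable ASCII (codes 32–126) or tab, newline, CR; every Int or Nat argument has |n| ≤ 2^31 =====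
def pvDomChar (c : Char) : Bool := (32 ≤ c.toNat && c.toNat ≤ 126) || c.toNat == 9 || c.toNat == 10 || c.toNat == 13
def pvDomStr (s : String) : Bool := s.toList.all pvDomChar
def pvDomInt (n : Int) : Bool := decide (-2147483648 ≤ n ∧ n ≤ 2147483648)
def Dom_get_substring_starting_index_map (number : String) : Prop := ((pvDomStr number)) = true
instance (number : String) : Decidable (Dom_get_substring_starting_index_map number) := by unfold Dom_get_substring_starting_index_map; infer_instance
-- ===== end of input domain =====

-- B replaces A's per-index re-slicing with a suffix recurrence (each row built by
-- prepending the current character to the next index's row); objective: alternative decomposition.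

-- ===== PORT A =====
def get_substring_starting_index_map (number : String) : List (Int × List String) :=
  if number == "" then []
  else
    ((PySem.List.pyRange 0 (PySem.Str.len number) 1).foldl
      (fun (m : PySem.Dict Int (List String)) i =>
        let substrs_starting_at_i :=
          (PySem.List.pyRange i (PySem.Str.len number) 1).foldl
            (fun acc j => acc ++ [PySem.Str.slice number (some i) (some (j + 1))]) []
        m.insert i substrs_starting_at_i)
      PySem.Dict.empty).items

-- ===== PORT B =====
def get_substring_starting_index_map_alt (number : String) : List (Int × List String) :=
  let st := number.toList.reverse.foldl
    (fun (st : List String × List (List String)) ch =>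
      let prev := String.ofList [ch] :: st.1.map (fun s => String.ofList (ch :: s.toList))
      (prev, st.2 ++ [prev]))
    ([], [])
  let rows := st.2.reverse
  (PySem.Dict.ofList (PySem.List.enumerate rows 0)).items

-- ===== PRECONDITION & SPEC =====
def Spec_get_substring_starting_index_map (number : String) (out : List (Int × List String)) : Prop := out = get_substring_starting_index_map_alt number
instance (number : String) (out : List (Int × List String)) : Decidable (Spec_get_substring_starting_index_map number out) := by unfold Spec_get_substring_starting_index_map; infer_instance

-- ===== CLAIM (what is proved, stated in full; the proofs are below) =====
def Claim_equal_get_substring_starting_index_map : Prop := ∀ (number : String), Dom_get_substring_starting_index_map number → Spec_get_substring_starting_index_map number (get_substring_starting_index_map number)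

-- ===== LEMMAS AND PROOFS =====

-- B's row recurrence, abstracted on the character list
def pvRowRec : List Char → List String
  | [] => []
  | c :: t => String.ofList [c] :: (pvRowRec t).map (fun s => String.ofList (c :: s.toList))

-- A's row at a given suffix: all prefixes of the suffix
def pvRowFun (l : List Char) : List String :=
  (List.range l.length).map (fun k => String.ofList (l.take (k + 1)))

def pvRevRows (l : List Char) : List (List String) :=
  (List.range l.length).map (fun i => pvRowRec (l.drop i))

theorem pvRowRec_eq_rowFun (l : List Char) : pvRowRec l = pvRowFun l := by
  induction l with
  | nil => rfl
  | cons c t ih =>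
      simp [pvRowRec, pvRowFun, ih, List.range_succ_eq_map, List.map_map, Function.comp]

theorem pv_foldl_append_singleton {α β : Type} (f : α → β) (l : List α) (acc : List β) :
    l.foldl (fun a x => a ++ [f x]) acc = acc ++ l.map f := by
  induction l generalizing acc with
  | nil => simp
  | cons x t ih => simp [ih]

theorem pv_fold_spec (l : List Char) :
    l.reverse.foldl
      (fun (st : List String × List (List String)) ch =>
        let prev := String.ofList [ch] :: st.1.map (fun s => String.ofList (ch :: s.toList))
        (prev, st.2 ++ [prev]))
      ([], []) = (pvRowRec l, (pvRevRows l).reverse) := by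
  induction l with
  | nil => rfl
  | cons c t ih =>
      have hrev : pvRevRows (c :: t) = pvRowRec (c :: t) :: pvRevRows t := by
        simp [pvRevRows, List.range_succ_eq_map, List.map_map, Function.comp, pvRowRec]
      simp only [List.reverse_cons, List.foldl_append, ih, List.foldl_cons, List.foldl_nil, hrev]
      simp [pvRowRec]

theorem pv_enumerate_map_range {α : Type} (f : Nat → α) (n : Nat) (s : Int) :
    PySem.List.enumerate ((List.range n).map f) s
      = (List.range n).map (fun (k : Nat) => ((s + k : Int), f k)) := by
  induction n generalizing s with
  | zero => rfl
  | succ m ih =>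
      simp [List.range_succ, PySem.List.enumerate_append, ih]

theorem pv_alt_eq (number : String) :
    get_substring_starting_index_map_alt number
      = (List.range number.toList.length).map
          (fun (k : Nat) => ((k : Int), pvRowRec (number.toList.drop k))) := by
  unfold get_substring_starting_index_map_alt
  simp only [pv_fold_spec, List.reverse_reverse]
  have h1 : (PySem.Dict.ofList (PySem.List.enumerate (pvRevRows number.toList) 0)).items
      = PySem.List.enumerate (pvRevRows number.toList) 0 := by
    have := PySem.Dict.items_foldl_insert_fresh
      (PySem.List.enumerate (pvRevRows number.toList) 0) (·.1) (·.2)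
      (PySem.Dict.empty (κ := Int) (ν := List String))
      (by intro a _; simp [PySem.Dict.contains_empty])
      (by
        have hfst := PySem.List.map_fst_enumerate (pvRevRows number.toList) 0
        simp only [hfst]
        exact PySem.List.nodup_pyRange_one _ _)
    simpa [PySem.Dict.ofList, PySem.Dict.update] using this
  rw [h1]
  unfold pvRevRows
  rw [pv_enumerate_map_range]
  simp

theorem pv_a_eq (number : String) (h : number ≠ "") :
    get_substring_starting_index_map number
      = (List.range number.toList.length).map
          (fun (k : Nat) => ((k : Int), pvRowFun (number.toList.drop k))) := by
  unfold get_substring_starting_index_map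
  rw [if_neg (by simpa using h)]
  have hitems := PySem.Dict.items_foldl_insert_fresh
    (PySem.List.pyRange 0 (PySem.Str.len number) 1) (fun i => i)
    (fun i => (PySem.List.pyRange i (PySem.Str.len number) 1).foldl
        (fun acc j => acc ++ [PySem.Str.slice number (some i) (some (j + 1))]) [])
    (PySem.Dict.empty (κ := Int) (ν := List String))
    (by intro a _; simp [PySem.Dict.contains_empty])
    (by simpa using PySem.List.nodup_pyRange_one 0 (PySem.Str.len number))
  simp only [hitems]
  rw [PySem.List.pyRange_one 0 (PySem.Str.len number)]
  simp only [PySem.Dict.empty, List.nil_append, List.map_map]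
  apply List.map_congr_left
  intro k hk
  simp only [Function.comp, zero_add, pv_foldl_append_singleton, Prod.mk.injEq, true_and]
  rw [PySem.List.pyRange_one ((k : Nat) : Int) (PySem.Str.len number)]
  simp only [PySem.Str.len_eq, pvRowFun, List.map_map]
  have hlen : (((number.toList.length : Int)) - (k : Nat)).toNat
      = (number.toList.drop k).length := by
    simp
  rw [hlen]
  apply List.map_congr_left
  intro m _
  have hcast : ((k : Int) + (m : Int) + 1) = ((k : Int) + ((m + 1 : Nat) : Int)) := by
    push_cast; ring
  have h2 : (PySem.Str.slice number (some (k : Nat)) (some ((k : Int) + m + 1))).toList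
      = (number.toList.drop k).take (m + 1) := by
    rw [PySem.Str.toList_slice, PySem.Chars.slice_eq_listSlice, hcast,
      PySem.List.slice_natCast_add]
  calc PySem.Str.slice number (some (k : Nat)) (some ((k : Int) + m + 1))
      = String.ofList (PySem.Str.slice number (some (k : Nat)) (some ((k : Int) + m + 1))).toList := String.ofList_toList.symm
    _ = String.ofList ((number.toList.drop k).take (m + 1)) := by rw [h2]

-- ===== VERDICT (by name: the statement is the Claim_ definition above) =====
theorem get_substring_starting_index_map_spec : Claim_equal_get_substring_starting_index_map := by
  intro number _
  unfold Spec_get_substring_starting_index_map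
  by_cases h : number = ""
  · subst h; decide
  · rw [pv_a_eq number h, pv_alt_eq]
    simp [pvRowRec_eq_rowFun]
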